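-- pv_equiv track=rewrite | github.com/Longi94/codejam | src/y2018/qual/universe.py | calculate_dmg
-- ===== SOURCE A (Python) =====
-- def calculate_dmg(str):
--     dmg = 0
--     power = 1
--
--     for ch in str:
--         if ch == 'C':
--             power = power * 2
--         if ch == 'S':
--             dmg = dmg + power
--
--     return dmg
-- ===== SOURCE B (Python) =====
-- def calculate_dmg(str):
--     return sum(2 ** str[:i].count('C') for i, ch in enumerate(str) if ch == 'S')
-- ===== Notes on version B (the rewrite author's own statement) =====
-- stated objective: alternative
-- what changed: Replaces A's single pass maintaining a doubling 'power' accumulator with a closed-form sum over the 'S' positions, where each term recomputes 2**(number of 'C' in the prefix) by rescanning the slice str[:i].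
import Mathlib
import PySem

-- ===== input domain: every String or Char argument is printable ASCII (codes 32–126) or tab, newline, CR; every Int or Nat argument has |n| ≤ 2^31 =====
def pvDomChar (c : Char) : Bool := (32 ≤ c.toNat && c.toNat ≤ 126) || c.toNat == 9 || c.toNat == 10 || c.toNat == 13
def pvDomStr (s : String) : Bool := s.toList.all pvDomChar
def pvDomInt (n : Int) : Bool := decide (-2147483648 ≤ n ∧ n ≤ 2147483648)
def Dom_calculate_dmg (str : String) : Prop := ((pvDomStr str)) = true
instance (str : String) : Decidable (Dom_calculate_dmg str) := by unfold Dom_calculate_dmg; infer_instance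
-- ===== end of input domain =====

-- B replaces A's running doubled 'power' accumulator by a sum over 'S' positions of
-- 2^(number of 'C' in the prefix), rescanning each prefix (objective: alternative).

-- ===== PORT A =====
-- single pass: dmg/power accumulator pair, power doubles on 'C', dmg += power on 'S'
def calculate_dmg (str : String) : Int :=
  (str.toList.foldl (fun st ch =>
    let power : Int := if ch == 'C' then st.2 * 2 else st.2
    let dmg : Int := if ch == 'S' then st.1 + power else st.1
    (dmg, power)) ((0 : Int), (1 : Int))).1

-- ===== PORT B =====
-- sum(2 ** str[:i].count('C') for i, ch in enumerate(str) if ch == 'S')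
-- str[:i] with i the nonnegative enumerate index is exactly 'take i'
def calculate_dmg_alt (str : String) : Int :=
  (PySem.List.enumerate str.toList 0).foldl
    (fun acc p => if p.2 == 'S' then acc + 2 ^ ((str.toList.take p.1.toNat).count 'C') else acc)
    (0 : Int)

-- ===== PRECONDITION & SPEC =====
def Spec_calculate_dmg (str : String) (out : Int) : Prop := out = calculate_dmg_alt str
instance (str : String) (out : Int) : Decidable (Spec_calculate_dmg str out) := by unfold Spec_calculate_dmg; infer_instance

-- ===== CLAIM (what is proved, stated in full; the proofs are below) =====
def Claim_equal_calculate_dmg : Prop := ∀ (str : String), Dom_calculate_dmg str → Spec_calculate_dmg str (calculate_dmg str)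

-- ===== LEMMAS AND PROOFS =====

-- abstract value: sum over 'S' positions of 2^(number of 'C' strictly before)
def pvBsum : List Char → Int
  | [] => 0
  | c :: t => (if c = 'S' then 1 else 0) + (if c = 'C' then 2 else 1) * pvBsum t

theorem pvFoldA (l : List Char) (d p : Int) :
    l.foldl (fun st ch =>
      let power : Int := if ch == 'C' then st.2 * 2 else st.2
      let dmg : Int := if ch == 'S' then st.1 + power else st.1
      (dmg, power)) (d, p)
    = (d + p * pvBsum l, p * 2 ^ (l.count 'C')) := by
  induction l generalizing d p with
  | nil => simp [pvBsum]
  | cons c t ih =>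
    simp only [List.foldl_cons, ih, pvBsum, List.count_cons]
    by_cases hS : c = 'S' <;> by_cases hC : c = 'C' <;>
      simp_all <;> first
        | (constructor <;> ring)
        | ring

theorem pvFoldB (l f : List Char) (n : Nat) (acc : Int) (hf : f.drop n = l) :
    (PySem.List.enumerate l (n : Int)).foldl
      (fun acc p => if p.2 == 'S' then acc + 2 ^ ((f.take p.1.toNat).count 'C') else acc) acc
    = acc + 2 ^ ((f.take n).count 'C') * pvBsum l := by
  induction l generalizing n acc with
  | nil => simp [PySem.List.enumerate_nil, pvBsum]
  | cons c t ih =>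
    have hget : f[n]? = some c := by
      have h0 : (f.drop n)[0]? = f[n + 0]? := List.getElem?_drop
      simpa [hf] using h0.symm
    have htake : f.take (n + 1) = f.take n ++ [c] := by
      rw [List.take_add_one, hget]; rfl
    have hdrop : f.drop (n + 1) = t := by
      have : f.drop (n + 1) = (f.drop n).drop 1 := by
        rw [List.drop_drop]
      simpa [hf] using this
    have hcast : ((n : Int) + 1) = ((n + 1 : Nat) : Int) := by push_cast; ring
    rw [PySem.List.enumerate_cons, List.foldl_cons, hcast, ih _ _ hdrop]
    simp only [Int.toNat_natCast, htake, List.count_append, pvBsum, pow_add]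
    by_cases hS : c = 'S' <;> by_cases hC : c = 'C' <;> simp_all <;> ring

-- ===== VERDICT (by name: the statement is the Claim_ definition above) =====
theorem calculate_dmg_spec : Claim_equal_calculate_dmg := by
  intro s _
  unfold Spec_calculate_dmg calculate_dmg calculate_dmg_alt
  rw [pvFoldA]
  have := pvFoldB s.toList s.toList 0 0 (by simp)
  simpa using this.symm
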